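-- pv_equiv track=rewrite | github.com/Sushanth0-0Reddy/plivo_assignment | pii_ner_assignment/src_pretrained/predict.py | labels_to_spans
-- ===== SOURCE A (Python) =====
-- def labels_to_spans(offsets, assignment_labels):
--     spans = []
--     current_label = None
--     current_start = None
--     current_end = None
--
--     for (start, end), label in zip(offsets, assignment_labels):
--         if start == 0 and end == 0:
--             continue
--         if label == "O" or label is None:
--             if current_label is not None:
--                 spans.append((current_start, current_end, current_label))
--                 current_label = None
--             continue
--         if current_label is None:
--             current_label = label
--             current_start = start
--             current_end = end
--         elif current_label == label:
--             current_end = end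
--         else:
--             spans.append((current_start, current_end, current_label))
--             current_label = label
--             current_start = start
--             current_end = end
--
--     if current_label is not None:
--         spans.append((current_start, current_end, current_label))
--
--     return spans
-- ===== SOURCE B (Python) =====
-- def labels_to_spans(offsets, assignment_labels):
--     # filter pass: drop special tokens with offset (0, 0)
--     toks = [t for t in zip(offsets, assignment_labels) if t[0] != (0, 0)]
--     spans = []
--     i = 0
--     n = len(toks)
--     while i < n:
--         lab = toks[i][1]
--         j = i + 1
--         while j < n and toks[j][1] == lab:
--             j += 1
--         if lab is not None and lab != "O":
--             spans.append((toks[i][0][0], toks[j - 1][0][1], lab))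
--         i = j
--     return spans
-- ===== Notes on version B (the rewrite author's own statement) =====
-- stated objective: alternative
-- what changed: Replaces A's per-token current_label/current_start/current_end state machine with a filter pass that drops (0,0)-offset tokens followed by a run-chunking scan (groupby-style) that emits one span per maximal run of equal labels.
import Mathlib
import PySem

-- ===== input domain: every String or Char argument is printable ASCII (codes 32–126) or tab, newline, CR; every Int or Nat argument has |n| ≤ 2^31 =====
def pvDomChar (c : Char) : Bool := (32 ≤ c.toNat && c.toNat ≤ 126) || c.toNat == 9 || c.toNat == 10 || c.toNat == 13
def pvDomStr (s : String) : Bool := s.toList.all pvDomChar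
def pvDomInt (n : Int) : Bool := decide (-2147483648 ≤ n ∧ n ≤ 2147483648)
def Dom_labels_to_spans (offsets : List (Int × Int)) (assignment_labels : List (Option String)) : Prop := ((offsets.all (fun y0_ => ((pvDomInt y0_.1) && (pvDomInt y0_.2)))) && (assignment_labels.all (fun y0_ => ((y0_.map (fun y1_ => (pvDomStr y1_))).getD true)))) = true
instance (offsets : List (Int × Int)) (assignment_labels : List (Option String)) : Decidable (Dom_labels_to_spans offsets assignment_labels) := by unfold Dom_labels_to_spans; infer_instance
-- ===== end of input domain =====

-- B replaces A's current_label/current_start/current_end state machine by a filter pass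
-- (dropping (0,0)-offset tokens) followed by a run-chunking scan; objective: alternative decomposition.


-- ===== PORT A =====
-- A's loop body: state = (spans, current span as Option (start, end, label))
def pvStepA (st : List (Int × Int × String) × Option (Int × Int × String))
    (p : (Int × Int) × Option String) : List (Int × Int × String) × Option (Int × Int × String) :=
  let (spans, cur) := st
  let ((s, e), label) := p
  if s == 0 && e == 0 then (spans, cur)
  else
    match label with
    | none =>
      (match cur with
       | some c => (spans ++ [c], none)
       | none => (spans, none))
    | some lab =>
      if lab == "O" then
        (match cur with
         | some c => (spans ++ [c], none)
         | none => (spans, none))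
      else
        match cur with
        | none => (spans, some (s, e, lab))
        | some (cs, ce, cl) =>
          if cl == lab then (spans, some (cs, e, cl))
          else (spans ++ [(cs, ce, cl)], some (s, e, lab))

def labels_to_spans (offsets : List (Int × Int)) (assignment_labels : List (Option String)) : List (Int × Int × String) :=
  let r := (offsets.zip assignment_labels).foldl pvStepA ([], none)
  match r.2 with
  | some c => r.1 ++ [c]
  | none => r.1

-- ===== PORT B =====
-- run-chunking scan over the filtered token list (Source B's while loops: the inner
-- j-advance is the takeWhile/dropWhile over the tail, the outer loop the recursion)
def pvRuns : List ((Int × Int) × Option String) → List (Int × Int × String)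
  | [] => []
  | t :: rest =>
    let lab := t.2
    let run := rest.takeWhile (fun u => u.2 == lab)
    let rest' := rest.dropWhile (fun u => u.2 == lab)
    let lastT := run.getLast?.getD t
    match lab with
    | none => pvRuns rest'
    | some l => if l == "O" then pvRuns rest' else (t.1.1, lastT.1.2, l) :: pvRuns rest'
termination_by l => l.length
decreasing_by all_goals
  simp only [List.length_cons]
  exact Nat.lt_succ_of_le (List.length_dropWhile_le _ _)

def labels_to_spans_alt (offsets : List (Int × Int)) (assignment_labels : List (Option String)) : List (Int × Int × String) :=
  pvRuns ((offsets.zip assignment_labels).filter (fun t => !(t.1 == ((0 : Int), (0 : Int)))))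

-- ===== PRECONDITION & SPEC =====
def Spec_labels_to_spans (offsets : List (Int × Int)) (assignment_labels : List (Option String)) (out : List (Int × Int × String)) : Prop := out = labels_to_spans_alt offsets assignment_labels
instance (offsets : List (Int × Int)) (assignment_labels : List (Option String)) (out : List (Int × Int × String)) : Decidable (Spec_labels_to_spans offsets assignment_labels out) := by unfold Spec_labels_to_spans; infer_instance

-- ===== CLAIM (what is proved, stated in full; the proofs are below) =====
def Claim_equal_labels_to_spans : Prop := ∀ (offsets : List (Int × Int)) (assignment_labels : List (Option String)), Dom_labels_to_spans offsets assignment_labels → Spec_labels_to_spans offsets assignment_labels (labels_to_spans offsets assignment_labels)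

-- ===== LEMMAS AND PROOFS =====

-- one-token-step reference machine used only by the proofs
def pvRunsC : Option (Int × Int × String) → List ((Int × Int) × Option String) → List (Int × Int × String)
  | none, [] => []
  | none, t :: rest =>
    match t.2 with
    | none => pvRunsC none rest
    | some l => if l == "O" then pvRunsC none rest else pvRunsC (some (t.1.1, t.1.2, l)) rest
  | some c, [] => [c]
  | some (cs, ce, cl), t :: rest =>
    match t.2 with
    | none => (cs, ce, cl) :: pvRunsC none rest
    | some l =>
      if l == "O" then (cs, ce, cl) :: pvRunsC none rest
      else if cl == l then pvRunsC (some (cs, t.1.2, cl)) rest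
      else (cs, ce, cl) :: pvRunsC (some (t.1.1, t.1.2, l)) rest


def pvFin (r : List (Int × Int × String) × Option (Int × Int × String)) : List (Int × Int × String) :=
  match r.2 with
  | some c => r.1 ++ [c]
  | none => r.1

lemma pvStepA_skip (st : List (Int × Int × String) × Option (Int × Int × String))
    (t : (Int × Int) × Option String) (h : t.1 = ((0:Int),(0:Int))) : pvStepA st t = st := by
  obtain ⟨spans, cur⟩ := st
  obtain ⟨⟨s, e⟩, lab⟩ := t
  simp only [Prod.mk.injEq] at h
  simp [pvStepA, h.1, h.2]

lemma pvFoldA_eq (toks : List ((Int × Int) × Option String))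
    (h : ∀ t ∈ toks, ¬ (t.1 = ((0:Int),(0:Int)))) :
    ∀ spans cur, pvFin (toks.foldl pvStepA (spans, cur)) = spans ++ pvRunsC cur toks := by
  induction toks with
  | nil => intro spans cur; cases cur <;> simp [pvFin, pvRunsC]
  | cons t rest ih =>
    intro spans cur
    have ht := h t (List.mem_cons_self ..)
    have h' : ∀ u ∈ rest, ¬ (u.1 = ((0:Int),(0:Int))) := fun u hu => h u (List.mem_cons_of_mem _ hu)
    obtain ⟨⟨s, e⟩, lab⟩ := t
    simp only [Prod.mk.injEq, not_and] at ht
    have hse : (s == 0 && e == 0) = false := by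
      by_cases hs : s = 0
      · simp [hs, ht hs]
      · simp [hs]
    cases lab with
    | none =>
      cases cur with
      | none => simpa [List.foldl_cons, pvStepA, hse, pvRunsC] using ih h' spans none
      | some c =>
        obtain ⟨cs, ce, cl⟩ := c
        have := ih h' (spans ++ [(cs, ce, cl)]) none
        simp only [List.foldl_cons, pvStepA, hse] at *
        simp [pvRunsC, this]
    | some l =>
      by_cases hO : l = "O"
      · cases cur with
        | none => simpa [List.foldl_cons, pvStepA, hse, hO, pvRunsC] using ih h' spans none
        | some c =>
          obtain ⟨cs, ce, cl⟩ := c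
          have := ih h' (spans ++ [(cs, ce, cl)]) none
          simp only [List.foldl_cons, pvStepA, hse, hO] at *
          simp [pvRunsC, this]
      · cases cur with
        | none =>
          simpa [List.foldl_cons, pvStepA, hse, hO, pvRunsC] using ih h' spans (some (s, e, l))
        | some c =>
          obtain ⟨cs, ce, cl⟩ := c
          by_cases hcl : cl = l
          · simpa [List.foldl_cons, pvStepA, hse, hO, hcl, pvRunsC] using
              ih h' spans (some (cs, e, l))
          · have := ih h' (spans ++ [(cs, ce, cl)]) (some (s, e, l))
            simp only [List.foldl_cons, pvStepA, hse] at *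
            simp [pvRunsC, hO, hcl, this]

lemma pvLastE_congr (l : List ((Int × Int) × Option String))
    (d1 d2 : (Int × Int) × Option String) (h : d1.1.2 = d2.1.2) :
    (l.getLast?.getD d1).1.2 = (l.getLast?.getD d2).1.2 := by
  cases hl : l.getLast? <;> simp [h]

-- labelled run absorbed into the open span, updating its end to the run's last end
lemma pvRunsC_run (cl : String) (hO : cl ≠ "O") :
    ∀ (run rest' : List ((Int × Int) × Option String)) (cs ce : Int),
      (∀ u ∈ run, u.2 = some cl) →
      pvRunsC (some (cs, ce, cl)) (run ++ rest')
        = pvRunsC (some (cs, (run.getLast?.getD (((cs, ce), some cl))).1.2, cl)) rest' := by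
  intro run
  induction run with
  | nil => intro rest' cs ce _; simp
  | cons u run' ih =>
    intro rest' cs ce hall
    have hu : u.2 = some cl := hall u (List.mem_cons_self ..)
    have := ih rest' cs u.1.2 (fun v hv => hall v (List.mem_cons_of_mem _ hv))
    rw [List.cons_append]
    rw [show pvRunsC (some (cs, ce, cl)) (u :: (run' ++ rest'))
        = pvRunsC (some (cs, u.1.2, cl)) (run' ++ rest') by
      obtain ⟨⟨us, ue⟩, ulab⟩ := u
      simp only at hu
      simp [pvRunsC, hu, hO]]
    have hend : (run'.getLast?.getD ((cs, u.1.2), some cl)).1.2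
        = ((u :: run').getLast?.getD ((cs, ce), some cl)).1.2 := by
      cases run' with
      | nil => simp
      | cons v run'' =>
        rw [List.getLast?_cons_cons]
        cases hgl : (v :: run'').getLast? with
        | none => simp at hgl
        | some w => simp
    rw [this, hend]

-- a run of "O"/None labels is dropped token by token
lemma pvRunsC_skip (t2 : Option String) (hO : t2 = none ∨ t2 = some "O") :
    ∀ (run rest' : List ((Int × Int) × Option String)),
      (∀ u ∈ run, u.2 = t2) → pvRunsC none (run ++ rest') = pvRunsC none rest' := by
  intro run
  induction run with
  | nil => intro rest' _; simp
  | cons u run' ih =>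
    intro rest' hall
    have hu : u.2 = t2 := hall u (List.mem_cons_self ..)
    have := ih rest' (fun v hv => hall v (List.mem_cons_of_mem _ hv))
    rw [List.cons_append, show pvRunsC none (u :: (run' ++ rest')) = pvRunsC none (run' ++ rest') by
      obtain ⟨⟨us, ue⟩, ulab⟩ := u
      simp only at hu
      rcases hO with h | h <;> simp [pvRunsC, hu, h]]
    exact this

-- when the next token's label differs from the open span's, the span is emitted
lemma pvRunsC_emit (cs ce : Int) (cl : String) (rest' : List ((Int × Int) × Option String))
    (h : ∀ u ∈ rest'.head?, ¬ (u.2 = some cl)) :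
    pvRunsC (some (cs, ce, cl)) rest' = (cs, ce, cl) :: pvRunsC none rest' := by
  cases rest' with
  | nil => simp [pvRunsC]
  | cons u rest'' =>
    have hu : ¬ (u.2 = some cl) := h u (by simp)
    obtain ⟨⟨us, ue⟩, ulab⟩ := u
    simp only at hu
    cases ulab with
    | none => simp [pvRunsC]
    | some l' =>
      by_cases hO : l' = "O"
      · simp [pvRunsC, hO]
      · have hne : ¬ (cl = l') := fun hh => hu (by rw [hh])
        simp [pvRunsC, hO, hne]

lemma pvRuns_eq_aux : ∀ (n : Nat) (toks : List ((Int × Int) × Option String)),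
    toks.length ≤ n → pvRuns toks = pvRunsC none toks := by
  intro n
  induction n with
  | zero =>
    intro toks h
    have : toks = [] := List.eq_nil_of_length_eq_zero (Nat.le_zero.mp h)
    subst this
    simp [pvRuns, pvRunsC]
  | succ n ih =>
    intro toks h
    cases toks with
    | nil => simp [pvRuns, pvRunsC]
    | cons t rest =>
      have hsplit := List.takeWhile_append_dropWhile (p := fun u => u.2 == t.2) (l := rest)
      have hlen : (rest.dropWhile (fun u => u.2 == t.2)).length ≤ n := by
        have h1 := List.length_dropWhile_le (fun u => u.2 == t.2) rest
        have h2 : rest.length + 1 ≤ n + 1 := by simpa using h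
        omega
      have hrec := ih _ hlen
      have hrun : ∀ u ∈ rest.takeWhile (fun u => u.2 == t.2), u.2 = t.2 := by
        intro u hu
        simpa using List.mem_takeWhile_imp hu
      have hheadB := List.head?_dropWhile_not (fun u => u.2 == t.2) rest
      rw [pvRuns]
      cases ht : t.2 with
      | none =>
        simp only [ht] at hsplit hrec hrun ⊢
        rw [hrec]
        have hskip := pvRunsC_skip none (Or.inl rfl) (rest.takeWhile (fun u => u.2 == none))
          (rest.dropWhile (fun u => u.2 == none)) hrun
        rw [hsplit] at hskip
        rw [show pvRunsC none (t :: rest) = pvRunsC none rest by simp [pvRunsC, ht]]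
        exact hskip.symm
      | some l =>
        by_cases hO : l = "O"
        · subst hO
          simp only [ht, beq_self_eq_true, if_true] at hsplit hrec hrun ⊢
          rw [hrec]
          have hskip := pvRunsC_skip (some "O") (Or.inr rfl) (rest.takeWhile (fun u => u.2 == some "O"))
            (rest.dropWhile (fun u => u.2 == some "O")) hrun
          rw [hsplit] at hskip
          rw [show pvRunsC none (t :: rest) = pvRunsC none rest by simp [pvRunsC, ht]]
          exact hskip.symm
        · simp only [ht] at hsplit hrec hrun hheadB ⊢
          rw [if_neg (by simpa using hO)]
          rw [hrec]
          have hmain := pvRunsC_run l hO (rest.takeWhile (fun u => u.2 == some l))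
            (rest.dropWhile (fun u => u.2 == some l)) t.1.1 t.1.2 hrun
          rw [hsplit] at hmain
          have hhead' : ∀ u ∈ (rest.dropWhile (fun u => u.2 == some l)).head?, ¬ (u.2 = some l) := by
            intro u hu
            rw [Option.mem_def] at hu
            rw [hu] at hheadB
            simpa using hheadB
          have hemit := pvRunsC_emit t.1.1
            (((rest.takeWhile (fun u => u.2 == some l)).getLast?.getD ((t.1.1, t.1.2), some l)).1.2) l
            (rest.dropWhile (fun u => u.2 == some l)) hhead'
          have hend := pvLastE_congr (rest.takeWhile (fun u => u.2 == some l))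
            ((t.1.1, t.1.2), some l) t rfl
          rw [show pvRunsC none (t :: rest) = pvRunsC (some (t.1.1, t.1.2, l)) rest by
            simp [pvRunsC, ht, hO]]
          rw [hmain, hemit, hend]

lemma pvRuns_eq (toks : List ((Int × Int) × Option String)) :
    pvRuns toks = pvRunsC none toks :=
  pvRuns_eq_aux toks.length toks le_rfl

lemma pvFilter_fold (l : List ((Int × Int) × Option String)) :
    ∀ st, l.foldl pvStepA st = (l.filter (fun t => !(t.1 == ((0:Int),(0:Int))))).foldl pvStepA st := by
  induction l with
  | nil => intro st; rfl
  | cons t l ih =>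
    intro st
    by_cases h : t.1 = ((0:Int),(0:Int))
    · simp [List.foldl_cons, h, pvStepA_skip st t h, ih]
    · simp [List.foldl_cons, h, ih]

-- ===== VERDICT (by name: the statement is the Claim_ definition above) =====
theorem labels_to_spans_spec : Claim_equal_labels_to_spans := by
  intro offsets labels _
  unfold Spec_labels_to_spans labels_to_spans labels_to_spans_alt
  rw [show (match (List.foldl pvStepA ([], none) (offsets.zip labels)).2 with
      | some c => (List.foldl pvStepA ([], none) (offsets.zip labels)).1 ++ [c]
      | none => (List.foldl pvStepA ([], none) (offsets.zip labels)).1)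
      = pvFin ((offsets.zip labels).foldl pvStepA ([], none)) from rfl]
  rw [pvFilter_fold]
  rw [pvFoldA_eq _ (by
    intro t ht
    have := List.of_mem_filter ht
    simpa using this)]
  rw [pvRuns_eq]
  simp
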